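-- pv_equiv track=rewrite | github.com/james5635/GeekForGeek-Data-Structure-and-Algorithm | hashing/medium/partition_consecutive_subsets/solution.py | can_partition_consecutive_subsets
-- ===== SOURCE A (Python) =====
-- from collections import defaultdict
--
-- def can_partition_consecutive_subsets(nums):
--     """
--     Check if array can be partitioned into consecutive subsequences of length >= 3.
--
--     Args:
--         nums: List of integers
--
--     Returns:
--         True if partition is possible, False otherwise
--     """
--     if not nums:
--         return True
--
--     freq = defaultdict(int)
--     need = defaultdict(int)
--
--     for num in nums:
--         freq[num] += 1
--
--     for num in sorted(nums):
--         if freq[num] == 0: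
--             continue
--
--         if need[num] > 0:
--             # Append to existing subsequence ending at num-1
--             need[num] -= 1
--             need[num + 1] += 1
--         elif freq[num + 1] > 0 and freq[num + 2] > 0:
--             # Start new subsequence: num, num+1, num+2
--             freq[num + 1] -= 1
--             freq[num + 2] -= 1
--             need[num + 3] += 1
--         else:
--             return False
--
--         freq[num] -= 1
--
--     return True
-- ===== SOURCE B (Python) =====
-- from collections import Counter
--
-- def can_partition_consecutive_subsets(nums):
--     """
--     Check if array can be partitioned into consecutive subsequences of length >= 3.
--
--     Batched variant: one pass over the sorted DISTINCT values, handling each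
--     whole group of equal values with counter arithmetic instead of one greedy
--     step per element.
--     """
--     freq = Counter(nums)
--     need = {}
--     for v in sorted(freq):
--         f = freq[v]
--         n = need.get(v, 0)
--         a = min(f, n)          # extend a existing subsequences with value v
--         if a:
--             need[v] = n - a
--             need[v + 1] = need.get(v + 1, 0) + a
--         s = f - a              # the rest must each start a new triple v,v+1,v+2
--         if s:
--             if freq.get(v + 1, 0) < s or freq.get(v + 2, 0) < s:
--                 return False
--             freq[v + 1] -= s
--             freq[v + 2] -= s
--             need[v + 3] = need.get(v + 3, 0) + s
--         freq[v] = 0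
--     return True
-- ===== Notes on version B (the rewrite author's own statement) =====
-- stated objective: alternative
-- what changed: B builds a Counter once, sorts only the distinct values, and consumes each whole group of equal values with one batched arithmetic step (min/ subtraction on the counters), instead of A's per-element greedy loop with skip-on-zero over the fully sorted list.
import Mathlib
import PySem

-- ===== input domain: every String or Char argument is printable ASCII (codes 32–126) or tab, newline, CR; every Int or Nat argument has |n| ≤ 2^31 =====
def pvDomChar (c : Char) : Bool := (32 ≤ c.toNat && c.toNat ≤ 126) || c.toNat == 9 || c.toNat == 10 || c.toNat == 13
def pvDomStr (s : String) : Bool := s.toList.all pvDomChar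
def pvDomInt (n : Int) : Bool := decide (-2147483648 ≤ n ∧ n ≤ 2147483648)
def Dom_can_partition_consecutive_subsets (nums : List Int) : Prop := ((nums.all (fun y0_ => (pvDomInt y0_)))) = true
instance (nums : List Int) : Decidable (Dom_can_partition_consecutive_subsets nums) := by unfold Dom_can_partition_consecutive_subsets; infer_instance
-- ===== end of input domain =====

-- B replaces A's per-element greedy over sorted(nums) by one batched counter-arithmetic step
-- per distinct value (objective: alternative decomposition, same greedy result).

-- shared loop runner: a Python for-loop over (freq, need) with an early 'return False',
-- as a fold over an Option state
def pvRun (step : PySem.Dict Int Int → PySem.Dict Int Int → Int →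
    Option (PySem.Dict Int Int × PySem.Dict Int Int))
    (l : List Int) (ost : Option (PySem.Dict Int Int × PySem.Dict Int Int)) :
    Option (PySem.Dict Int Int × PySem.Dict Int Int) :=
  l.foldl (fun ost num => ost.bind (fun st => step st.1 st.2 num)) ost

-- ===== PORT A =====
-- one iteration of A's loop body; none = 'return False'
def pvStepA (freq need : PySem.Dict Int Int) (num : Int) :
    Option (PySem.Dict Int Int × PySem.Dict Int Int) :=
  if freq.getD num 0 = 0 then some (freq, need)   -- continue
  else if need.getD num 0 > 0 then
    -- need[num] -= 1 ; need[num+1] += 1 ; freq[num] -= 1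
    let need1 := need.insert num (need.getD num 0 - 1)
    let need2 := need1.insert (num + 1) (need1.getD (num + 1) 0 + 1)
    some (freq.insert num (freq.getD num 0 - 1), need2)
  else if freq.getD (num + 1) 0 > 0 ∧ freq.getD (num + 2) 0 > 0 then
    -- freq[num+1] -= 1 ; freq[num+2] -= 1 ; need[num+3] += 1 ; freq[num] -= 1
    let freq1 := freq.insert (num + 1) (freq.getD (num + 1) 0 - 1)
    let freq2 := freq1.insert (num + 2) (freq1.getD (num + 2) 0 - 1)
    let need1 := need.insert (num + 3) (need.getD (num + 3) 0 + 1)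
    some (freq2.insert num (freq2.getD num 0 - 1), need1)
  else none                                       -- return False

def can_partition_consecutive_subsets (nums : List Int) : Bool :=
  if nums = [] then true
  else
    -- for num in nums: freq[num] += 1   (defaultdict(int))
    let freq := nums.foldl (fun d num => d.modify num 0 (· + 1)) PySem.Dict.empty
    match pvRun pvStepA (PySem.List.sorted nums (fun x => x)) (some (freq, PySem.Dict.empty)) with
    | some _ => true
    | none => false

-- ===== PORT B =====
-- one iteration of B's loop, consuming the whole group of value v at once
def pvStepB (freq need : PySem.Dict Int Int) (v : Int) :
    Option (PySem.Dict Int Int × PySem.Dict Int Int) :=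
  let f := freq.getD v 0
  let n := need.getD v 0
  let a := min f n
  let need1 :=
    if a ≠ 0 then
      let nd := need.insert v (n - a)
      nd.insert (v + 1) (nd.getD (v + 1) 0 + a)
    else need
  let s := f - a
  if s ≠ 0 then
    if freq.getD (v + 1) 0 < s ∨ freq.getD (v + 2) 0 < s then none  -- return False
    else
      let freq1 := freq.insert (v + 1) (freq.getD (v + 1) 0 - s)
      let freq2 := freq1.insert (v + 2) (freq1.getD (v + 2) 0 - s)
      some (freq2.insert v 0, need1.insert (v + 3) (need1.getD (v + 3) 0 + s))
  else some (freq.insert v 0, need1)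

def can_partition_consecutive_subsets_alt (nums : List Int) : Bool :=
  let freq := PySem.Dict.counter nums
  match pvRun pvStepB (PySem.List.sorted freq.keys (fun x => x)) (some (freq, PySem.Dict.empty)) with
  | some _ => true
  | none => false

-- ===== PRECONDITION & SPEC =====
def Spec_can_partition_consecutive_subsets (nums : List Int) (out : Bool) : Prop := out = can_partition_consecutive_subsets_alt nums
instance (nums : List Int) (out : Bool) : Decidable (Spec_can_partition_consecutive_subsets nums out) := by unfold Spec_can_partition_consecutive_subsets; infer_instance

-- ===== CLAIM (what is proved, stated in full; the proofs are below) =====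
def Claim_equal_can_partition_consecutive_subsets : Prop := ∀ (nums : List Int), Dom_can_partition_consecutive_subsets nums → Spec_can_partition_consecutive_subsets nums (can_partition_consecutive_subsets nums)

-- ===== LEMMAS AND PROOFS =====

theorem pvRun_none (step) (l : List Int) : pvRun step l none = none := by
  induction l with
  | nil => rfl
  | cons x t ih => simpa [pvRun] using ih

theorem pvRun_append (step) (l₁ l₂ : List Int) (ost) :
    pvRun step (l₁ ++ l₂) ost = pvRun step l₂ (pvRun step l₁ ost) := by
  simp [pvRun, List.foldl_append]

theorem pvRun_cons (step) (x : Int) (t : List Int) (F N : PySem.Dict Int Int) :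
    pvRun step (x :: t) (some (F, N)) = pvRun step t (step F N x) := by
  simp [pvRun]

-- getD ≠ default forces the key to be present
theorem pv_contains_of_getD_ne (d : PySem.Dict Int Int) (k : Int) (h : d.getD k 0 ≠ 0) :
    d.contains k = true := by
  by_contra hc
  exact h (PySem.Dict.getD_of_not_contains d 0 (by simpa using hc))

-- inserting at a PRESENT key commutes (as item lists) with any other insert
theorem pv_insert_comm (d : PySem.Dict Int Int) (k k' : Int) (v w : Int)
    (hne : k ≠ k') (hk' : d.contains k' = true) :
    (d.insert k v).insert k' w = (d.insert k' w).insert k v := by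
  have hb1 : ((k' : Int) == k) = false := by simp [Ne.symm hne]
  have hb2 : ((k : Int) == k') = false := by simp [hne]
  apply PySem.Dict.ext
  by_cases hk : d.contains k = true
  · rw [PySem.Dict.items_insert_of_contains _ w
        (by simp [PySem.Dict.contains_insert, hk']),
      PySem.Dict.items_insert_of_contains _ v hk,
      PySem.Dict.items_insert_of_contains _ v
        (by simp [PySem.Dict.contains_insert, hk]),
      PySem.Dict.items_insert_of_contains _ w hk']
    rw [List.map_map, List.map_map]
    apply List.map_congr_left
    intro p _
    rcases p with ⟨pk, pv⟩
    by_cases e1 : pk = k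
    · subst e1
      simp [hb2, hne]
    · by_cases e2 : pk = k'
      · subst e2
        simp [hb1, e1]
      · simp [e1, e2]
  · have hk2 : d.contains k = false := by simpa using hk
    rw [PySem.Dict.items_insert_of_contains _ w
        (by simp [PySem.Dict.contains_insert, hk']),
      PySem.Dict.items_insert_of_not_contains _ v hk2,
      PySem.Dict.items_insert_of_not_contains _ v
        (by simp [PySem.Dict.contains_insert, hk2, hb2]),
      PySem.Dict.items_insert_of_contains _ w hk']
    rw [List.map_append]
    simp only [List.map_cons, List.map_nil, hb2, if_false, Bool.false_eq_true]

-- re-inserting the stored value changes nothing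
theorem pv_insert_noop (d : PySem.Dict Int Int) (k : Int) (w : Int)
    (hnd : d.keys.Nodup) (hk : d.contains k = true) (hv : d.getD k 0 = w) :
    d.insert k w = d := by
  apply PySem.Dict.ext
  rw [PySem.Dict.items_insert_of_contains _ w hk]
  have hcongr : ∀ p ∈ d.items,
      (fun p : Int × Int => if (p.1 == k) = true then (k, w) else p) p = id p := by
    intro p hp
    rcases p with ⟨pk, pv⟩
    by_cases e : pk = k
    · subst e
      have h2 : d.getD pk 0 = pv := PySem.Dict.getD_of_mem_items d hp hnd 0
      have hw : pv = w := by rw [← hv, ← h2]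
      simp [hw]
    · simp [e]
  rw [List.map_congr_left hcongr, List.map_id]

-- overwrite an earlier insert through one intervening insert at another key
theorem pv_collapse (d : PySem.Dict Int Int) (k1 k2 c1 c2 c1' : Int) (hne : k1 ≠ k2) :
    ((d.insert k1 c1).insert k2 c2).insert k1 c1' = (d.insert k1 c1').insert k2 c2 := by
  rw [pv_insert_comm (d.insert k1 c1) k2 k1 c2 c1' (Ne.symm hne)
      (PySem.Dict.contains_insert_self d k1 c1),
    PySem.Dict.insert_insert_self]

-- pull a buried insert at v (two other-key inserts above it) up to a final overwrite of v
theorem pv_insert_bury (d : PySem.Dict Int Int) (v w k1 c1 k2 c2 w' : Int)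
    (h1 : d.contains k1 = true) (h2 : d.contains k2 = true)
    (hv1 : k1 ≠ v) (hv2 : k2 ≠ v) :
    (((d.insert v w).insert k1 c1).insert k2 c2).insert v w'
      = ((d.insert k1 c1).insert k2 c2).insert v w' := by
  rw [pv_insert_comm d v k1 w c1 (Ne.symm hv1) h1,
    pv_insert_comm (d.insert k1 c1) v k2 w c2 (Ne.symm hv2)
      (by simp [PySem.Dict.contains_insert, h2]),
    PySem.Dict.insert_insert_self]

-- normal form of B's step, with all reads pushed to the original dicts
theorem pvStepB_eq (F N : PySem.Dict Int Int) (v : Int) :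
    pvStepB F N v =
      if F.getD v 0 - min (F.getD v 0) (N.getD v 0) = 0 then
        some (F.insert v 0,
          if min (F.getD v 0) (N.getD v 0) = 0 then N
          else (N.insert v (N.getD v 0 - min (F.getD v 0) (N.getD v 0))).insert (v + 1)
            (N.getD (v + 1) 0 + min (F.getD v 0) (N.getD v 0)))
      else if F.getD (v + 1) 0 < F.getD v 0 - min (F.getD v 0) (N.getD v 0) ∨
          F.getD (v + 2) 0 < F.getD v 0 - min (F.getD v 0) (N.getD v 0) then none
      else
        some
          (((F.insert (v + 1)
                (F.getD (v + 1) 0 - (F.getD v 0 - min (F.getD v 0) (N.getD v 0)))).insert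
              (v + 2)
              (F.getD (v + 2) 0 - (F.getD v 0 - min (F.getD v 0) (N.getD v 0)))).insert v 0,
            (if min (F.getD v 0) (N.getD v 0) = 0 then N
             else (N.insert v (N.getD v 0 - min (F.getD v 0) (N.getD v 0))).insert (v + 1)
               (N.getD (v + 1) 0 + min (F.getD v 0) (N.getD v 0))).insert (v + 3)
              (N.getD (v + 3) 0 + (F.getD v 0 - min (F.getD v 0) (N.getD v 0)))) := by
  have n10 : ¬((v + 1 : Int) = v) := by omega
  have n21 : ¬((v + 2 : Int) = v + 1) := by omega
  have n30 : ¬((v + 3 : Int) = v) := by omega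
  have n31 : ¬((v + 3 : Int) = v + 1) := by omega
  unfold pvStepB
  simp only [PySem.Dict.getD_insert, n10, n21, n30, n31, if_false, ne_eq]
  generalize hA : min (F.getD v 0) (N.getD v 0) = a
  split_ifs <;>
    first
    | rfl
    | (exfalso; omega)
    | (rw [PySem.Dict.getD_insert_of_ne _ _ _ n31, PySem.Dict.getD_insert_of_ne _ _ _ n30])

-- one 'append' step of A absorbed into B's batched step
theorem pv_stepB_append_absorb (F N : PySem.Dict Int Int) (v : Int)
    (hf : 0 < F.getD v 0) (hn : 0 < N.getD v 0) :
    pvStepB (F.insert v (F.getD v 0 - 1))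
      ((N.insert v (N.getD v 0 - 1)).insert (v + 1)
        ((N.insert v (N.getD v 0 - 1)).getD (v + 1) 0 + 1)) v
      = pvStepB F N v := by
  have n10 : ¬((v + 1 : Int) = v) := by omega
  have n01 : ¬((v : Int) = v + 1) := by omega
  have n20 : ¬((v + 2 : Int) = v) := by omega
  have n02 : ¬((v : Int) = v + 2) := by omega
  have n21 : ¬((v + 2 : Int) = v + 1) := by omega
  have n30 : ¬((v + 3 : Int) = v) := by omega
  have n31 : ¬((v + 3 : Int) = v + 1) := by omega
  rw [pvStepB_eq, pvStepB_eq]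
  simp only [PySem.Dict.getD_insert, n10, n01, n20, n02, n21, n30, n31, if_false, if_true]
  rw [show min (F.getD v 0 - 1) (N.getD v 0 - 1)
      = min (F.getD v 0) (N.getD v 0) - 1 from by omega]
  generalize hA : min (F.getD v 0) (N.getD v 0) = a
  have hapos : 0 < a := by omega
  rw [show F.getD v 0 - 1 - (a - 1) = F.getD v 0 - a from by omega]
  rw [show N.getD v 0 - 1 - (a - 1) = N.getD v 0 - a from by omega]
  rw [show N.getD (v + 1) 0 + 1 + (a - 1) = N.getD (v + 1) 0 + a from by omega]
  simp only [if_neg (show ¬(a = 0) from by omega)]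
  split_ifs <;>
    first
    | rfl
    | (exfalso; omega)
    | (rw [PySem.Dict.insert_insert_self,
        show N.getD v 0 - a = N.getD v 0 - 1 from by omega,
        show N.getD (v + 1) 0 + a = N.getD (v + 1) 0 + 1 from by omega])
    | (rw [PySem.Dict.insert_insert_self,
        pv_collapse N v (v + 1) (N.getD v 0 - 1) (N.getD (v + 1) 0 + 1)
          (N.getD v 0 - a) n01,
        PySem.Dict.insert_insert_self])
    | (rw [pv_insert_bury F v (F.getD v 0 - 1) (v + 1) _ (v + 2) _ 0
          (pv_contains_of_getD_ne F (v + 1) (by omega))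
          (pv_contains_of_getD_ne F (v + 2) (by omega)) (by omega) (by omega),
        show N.getD v 0 - a = N.getD v 0 - 1 from by omega,
        show N.getD (v + 1) 0 + a = N.getD (v + 1) 0 + 1 from by omega])
    | (rw [pv_insert_bury F v (F.getD v 0 - 1) (v + 1) _ (v + 2) _ 0
          (pv_contains_of_getD_ne F (v + 1) (by omega))
          (pv_contains_of_getD_ne F (v + 2) (by omega)) (by omega) (by omega),
        pv_collapse N v (v + 1) (N.getD v 0 - 1) (N.getD (v + 1) 0 + 1)
          (N.getD v 0 - a) n01,
        PySem.Dict.insert_insert_self])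

-- one 'start a triple' step of A absorbed into B's batched step
theorem pv_stepB_start_absorb (F N : PySem.Dict Int Int) (v : Int)
    (hf : 0 < F.getD v 0) (hn : N.getD v 0 = 0)
    (h1 : 0 < F.getD (v + 1) 0) (h2 : 0 < F.getD (v + 2) 0) :
    pvStepB
      (((F.insert (v + 1) (F.getD (v + 1) 0 - 1)).insert (v + 2)
          ((F.insert (v + 1) (F.getD (v + 1) 0 - 1)).getD (v + 2) 0 - 1)).insert v
        (((F.insert (v + 1) (F.getD (v + 1) 0 - 1)).insert (v + 2)
            ((F.insert (v + 1) (F.getD (v + 1) 0 - 1)).getD (v + 2) 0 - 1)).getD v 0 - 1))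
      (N.insert (v + 3) (N.getD (v + 3) 0 + 1)) v
      = pvStepB F N v := by
  have n10 : ¬((v + 1 : Int) = v) := by omega
  have n01 : ¬((v : Int) = v + 1) := by omega
  have n20 : ¬((v + 2 : Int) = v) := by omega
  have n02 : ¬((v : Int) = v + 2) := by omega
  have n21 : ¬((v + 2 : Int) = v + 1) := by omega
  have n12 : ¬((v + 1 : Int) = v + 2) := by omega
  have n03 : ¬((v : Int) = v + 3) := by omega
  have n13 : ¬((v + 1 : Int) = v + 3) := by omega
  rw [pvStepB_eq, pvStepB_eq]
  simp only [PySem.Dict.getD_insert, n10, n01, n20, n02, n21, n12, n03, n13,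
    if_false, if_true, hn]
  rw [show min (F.getD v 0 - 1) (0 : Int) = 0 from by omega,
    show min (F.getD v 0) (0 : Int) = 0 from by omega]
  simp only [sub_zero]
  rw [show F.getD (v + 1) 0 - 1 - (F.getD v 0 - 1) = F.getD (v + 1) 0 - F.getD v 0 from by omega,
    show F.getD (v + 2) 0 - 1 - (F.getD v 0 - 1) = F.getD (v + 2) 0 - F.getD v 0 from by omega,
    show N.getD (v + 3) 0 + 1 + (F.getD v 0 - 1) = N.getD (v + 3) 0 + F.getD v 0 from by omega]
  split_ifs <;>
    first
    | rfl
    | (exfalso; omega)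
    | (rw [PySem.Dict.insert_insert_self,
        show F.getD (v + 1) 0 - F.getD v 0 = F.getD (v + 1) 0 - 1 from by omega,
        show F.getD (v + 2) 0 - F.getD v 0 = F.getD (v + 2) 0 - 1 from by omega,
        show N.getD (v + 3) 0 + F.getD v 0 = N.getD (v + 3) 0 + 1 from by omega])
    | (rw [pv_insert_bury _ v (F.getD v 0 - 1) (v + 1) _ (v + 2) _ 0
          (by simp [PySem.Dict.contains_insert, PySem.Dict.contains_insert_self])
          (PySem.Dict.contains_insert_self _ _ _) (by omega) (by omega),
        pv_collapse F (v + 1) (v + 2) (F.getD (v + 1) 0 - 1) _ _ (by omega),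
        PySem.Dict.insert_insert_self, PySem.Dict.insert_insert_self])

-- B's step preserves the invariants needed for the remaining (distinct) values
theorem pv_stepB_pres (F N F' N' : PySem.Dict Int Int) (v : Int)
    (hndF : F.keys.Nodup) (hF : ∀ k, 0 ≤ F.getD k 0) (hN : ∀ k, 0 ≤ N.getD k 0)
    (h : pvStepB F N v = some (F', N')) :
    F'.keys.Nodup ∧ (∀ k, 0 ≤ F'.getD k 0) ∧ (∀ k, 0 ≤ N'.getD k 0) ∧
      (∀ k, k ≠ v → F'.getD k 0 ≤ F.getD k 0) ∧
      (∀ k, F.contains k = true → F'.contains k = true) := by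
  have hfv := hF v
  have hnv := hN v
  have hp := hF (v + 1)
  have hq := hF (v + 2)
  have hx := hN (v + 1)
  have hr := hN (v + 3)
  rw [pvStepB_eq F N v] at h
  revert h
  generalize hA : min (F.getD v 0) (N.getD v 0) = a
  intro h
  by_cases c1 : F.getD v 0 - a = 0
  · rw [if_pos c1] at h
    by_cases c2 : a = 0
    · rw [if_pos c2] at h
      simp only [Option.some.injEq, Prod.mk.injEq] at h
      obtain ⟨hFe, hNe⟩ := h
      subst hFe
      subst hNe
      refine ⟨by repeat first | exact hndF | apply PySem.Dict.nodup_keys_insert,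
        fun k => by
          have hk1 := hF k
          first
          | omega
          | (simp only [PySem.Dict.getD_insert, if_true, ite_true]
             split_ifs <;> omega),
        fun k => by
          have hk2 := hN k
          first
          | omega
          | (simp only [PySem.Dict.getD_insert, if_true, ite_true]
             split_ifs <;> omega),
        fun k hk => by
          rcases eq_or_ne k (v + 1) with e1 | e1
          · subst e1
            simp only [PySem.Dict.getD_insert, if_true, ite_true]
            split_ifs <;> omega
          · rcases eq_or_ne k (v + 2) with e2 | e2
            · subst e2
              simp only [PySem.Dict.getD_insert, if_true, ite_true]
              split_ifs <;> omega
            · simp only [PySem.Dict.getD_insert, hk, e1, e2, if_false]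
              exact le_refl _,
        fun k hc => by simp [PySem.Dict.contains_insert, hc]⟩
    · rw [if_neg c2] at h
      simp only [Option.some.injEq, Prod.mk.injEq] at h
      obtain ⟨hFe, hNe⟩ := h
      subst hFe
      subst hNe
      refine ⟨by repeat first | exact hndF | apply PySem.Dict.nodup_keys_insert,
        fun k => by
          have hk1 := hF k
          first
          | omega
          | (simp only [PySem.Dict.getD_insert, if_true, ite_true]
             split_ifs <;> omega),
        fun k => by
          have hk2 := hN k
          first
          | omega
          | (simp only [PySem.Dict.getD_insert, if_true, ite_true]
             split_ifs <;> omega),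
        fun k hk => by
          rcases eq_or_ne k (v + 1) with e1 | e1
          · subst e1
            simp only [PySem.Dict.getD_insert, if_true, ite_true]
            split_ifs <;> omega
          · rcases eq_or_ne k (v + 2) with e2 | e2
            · subst e2
              simp only [PySem.Dict.getD_insert, if_true, ite_true]
              split_ifs <;> omega
            · simp only [PySem.Dict.getD_insert, hk, e1, e2, if_false]
              exact le_refl _,
        fun k hc => by simp [PySem.Dict.contains_insert, hc]⟩
  · rw [if_neg c1] at h
    by_cases c3 : (F.getD (v + 1) 0 < F.getD v 0 - a ∨ F.getD (v + 2) 0 < F.getD v 0 - a)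
    · rw [if_pos c3] at h
      simp at h
    · rw [if_neg c3] at h
      by_cases c2 : a = 0
      · rw [if_pos c2] at h
        simp only [Option.some.injEq, Prod.mk.injEq] at h
        obtain ⟨hFe, hNe⟩ := h
        subst hFe
        subst hNe
        refine ⟨by repeat first | exact hndF | apply PySem.Dict.nodup_keys_insert,
          fun k => by
            have hk1 := hF k
            first
            | omega
            | (simp only [PySem.Dict.getD_insert, if_true, ite_true]
               split_ifs <;> omega),
          fun k => by
            have hk2 := hN k
            first
            | omega
            | (simp only [PySem.Dict.getD_insert, if_true, ite_true]
               split_ifs <;> omega),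
          fun k hk => by
            rcases eq_or_ne k (v + 1) with e1 | e1
            · subst e1
              simp only [PySem.Dict.getD_insert, if_true, ite_true]
              split_ifs <;> omega
            · rcases eq_or_ne k (v + 2) with e2 | e2
              · subst e2
                simp only [PySem.Dict.getD_insert, if_true, ite_true]
                split_ifs <;> omega
              · simp only [PySem.Dict.getD_insert, hk, e1, e2, if_false]
                exact le_refl _,
          fun k hc => by simp [PySem.Dict.contains_insert, hc]⟩
      · rw [if_neg c2] at h
        simp only [Option.some.injEq, Prod.mk.injEq] at h
        obtain ⟨hFe, hNe⟩ := h
        subst hFe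
        subst hNe
        refine ⟨by repeat first | exact hndF | apply PySem.Dict.nodup_keys_insert,
          fun k => by
            have hk1 := hF k
            first
            | omega
            | (simp only [PySem.Dict.getD_insert, if_true, ite_true]
               split_ifs <;> omega),
          fun k => by
            have hk2 := hN k
            first
            | omega
            | (simp only [PySem.Dict.getD_insert, if_true, ite_true]
               split_ifs <;> omega),
          fun k hk => by
            rcases eq_or_ne k (v + 1) with e1 | e1
            · subst e1
              simp only [PySem.Dict.getD_insert, if_true, ite_true]
              split_ifs <;> omega
            · rcases eq_or_ne k (v + 2) with e2 | e2
              · subst e2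
                simp only [PySem.Dict.getD_insert, if_true, ite_true]
                split_ifs <;> omega
              · simp only [PySem.Dict.getD_insert, hk, e1, e2, if_false]
                exact le_refl _,
          fun k hc => by simp [PySem.Dict.contains_insert, hc]⟩

-- A over a whole group of m copies of v = one batched step of B
theorem pvRunA_replicate (m : Nat) (F N : PySem.Dict Int Int) (v : Int)
    (hndF : F.keys.Nodup) (hvF : F.contains v = true)
    (hF : ∀ k, 0 ≤ F.getD k 0) (hN : ∀ k, 0 ≤ N.getD k 0)
    (hm : F.getD v 0 ≤ (m : Int)) :
    pvRun pvStepA (List.replicate m v) (some (F, N)) = pvStepB F N v := by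
  induction m generalizing F N with
  | zero =>
    have hf0 : F.getD v 0 = 0 := le_antisymm (by exact_mod_cast hm) (hF v)
    rw [pvStepB_eq F N v]
    rw [show min (F.getD v 0) (N.getD v 0) = 0 from by have := hN v; omega, hf0]
    norm_num
    rw [pv_insert_noop F v 0 hndF hvF hf0]
    rfl
  | succ m ih =>
    rw [List.replicate_succ, pvRun_cons]
    by_cases hf0 : F.getD v 0 = 0
    · rw [show pvStepA F N v = some (F, N) from by unfold pvStepA; rw [if_pos hf0]]
      exact ih F N hndF hvF hF hN (by rw [hf0]; positivity)
    · have hfpos : 0 < F.getD v 0 := lt_of_le_of_ne (hF v) (Ne.symm hf0)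
      by_cases hnv : N.getD v 0 > 0
      · -- append
        rw [show pvStepA F N v = some (F.insert v (F.getD v 0 - 1),
            (N.insert v (N.getD v 0 - 1)).insert (v + 1)
              ((N.insert v (N.getD v 0 - 1)).getD (v + 1) 0 + 1)) from by
          unfold pvStepA; rw [if_neg hf0, if_pos hnv]]
        rw [ih _ _ (PySem.Dict.nodup_keys_insert _ _ _ hndF)
          (PySem.Dict.contains_insert_self _ _ _)
          (by
            intro k
            have := hF k
            simp only [PySem.Dict.getD_insert]
            split_ifs <;> omega)
          (by
            intro k
            have := hN k
            have := hN (v + 1)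
            simp only [PySem.Dict.getD_insert]
            split_ifs <;> omega)
          (by
            simp only [PySem.Dict.getD_insert, if_true, ite_true]
            omega)]
        exact pv_stepB_append_absorb F N v hfpos hnv
      · have hn0 : N.getD v 0 = 0 := le_antisymm (by omega) (hN v)
        by_cases hpq : F.getD (v + 1) 0 > 0 ∧ F.getD (v + 2) 0 > 0
        · -- start a triple
          rw [show pvStepA F N v = some
              (((F.insert (v + 1) (F.getD (v + 1) 0 - 1)).insert (v + 2)
                  ((F.insert (v + 1) (F.getD (v + 1) 0 - 1)).getD (v + 2) 0 - 1)).insert v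
                (((F.insert (v + 1) (F.getD (v + 1) 0 - 1)).insert (v + 2)
                    ((F.insert (v + 1) (F.getD (v + 1) 0 - 1)).getD (v + 2) 0 - 1)).getD v 0 - 1),
              N.insert (v + 3) (N.getD (v + 3) 0 + 1)) from by
            unfold pvStepA; rw [if_neg hf0, if_neg hnv, if_pos hpq]]
          rw [ih _ _
            (PySem.Dict.nodup_keys_insert _ _ _ (PySem.Dict.nodup_keys_insert _ _ _
              (PySem.Dict.nodup_keys_insert _ _ _ hndF)))
            (PySem.Dict.contains_insert_self _ _ _)
            (by
              intro k
              have := hF k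
              have := hF (v + 1)
              have := hF (v + 2)
              simp only [PySem.Dict.getD_insert]
              split_ifs <;> omega)
            (by
              intro k
              have := hN k
              have := hN (v + 3)
              simp only [PySem.Dict.getD_insert]
              split_ifs <;> omega)
            (by
              have e1 : ¬((v : Int) = v + 1) := by omega
              have e2 : ¬((v : Int) = v + 2) := by omega
              simp only [PySem.Dict.getD_insert, e1, e2, if_false, if_true, ite_true]
              omega)]
          exact pv_stepB_start_absorb F N v hfpos hn0 hpq.1 hpq.2
        · -- fail
          rw [show pvStepA F N v = none from by
            unfold pvStepA; rw [if_neg hf0, if_neg hnv, if_neg hpq]]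
          rw [pvRun_none, pvStepB_eq F N v, hn0]
          rw [show min (F.getD v 0) (0 : Int) = 0 from by omega]
          simp only [sub_zero]
          rw [if_neg hf0, if_pos (by
            have := hF (v + 1)
            have := hF (v + 2)
            omega)]

-- the key simulation: A element-by-element over the flattened groups = B group-by-group
theorem pvRun_flatMap (nums : List Int) : ∀ (ks : List Int) (F N : PySem.Dict Int Int),
    ks.Nodup →
    (∀ v ∈ ks, F.contains v = true ∧ F.getD v 0 ≤ (nums.count v : Int)) →
    F.keys.Nodup → (∀ k, 0 ≤ F.getD k 0) → (∀ k, 0 ≤ N.getD k 0) →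
    pvRun pvStepA (ks.flatMap fun v => List.replicate (nums.count v) v) (some (F, N))
      = pvRun pvStepB ks (some (F, N)) := by
  intro ks
  induction ks with
  | nil => intro F N _ _ _ _ _; rfl
  | cons v t ih =>
    intro F N hnd hmem hndF hF hN
    obtain ⟨hvt, hnd'⟩ := List.nodup_cons.mp hnd
    rw [List.flatMap_cons, pvRun_append,
      pvRunA_replicate (nums.count v) F N v hndF (hmem v (by simp)).1 hF hN
        (hmem v (by simp)).2,
      pvRun_cons]
    cases hB : pvStepB F N v with
    | none => rw [pvRun_none, pvRun_none]
    | some st =>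
      obtain ⟨F', N'⟩ := st
      obtain ⟨pnd, pF, pN, ple, pcont⟩ := pv_stepB_pres F N F' N' v hndF hF hN hB
      exact ih F' N' hnd'
        (fun u hu => ⟨pcont u (hmem u (by simp [hu])).1,
          le_trans (ple u (fun e => hvt (e ▸ hu))) (hmem u (by simp [hu])).2⟩)
        pnd pF pN

-- count of an element in the flattened groups
theorem pv_count_flatMap (c : Int → Nat) (t : List Int) (hnd : t.Nodup) (a : Int) :
    (t.flatMap fun v => List.replicate (c v) v).count a = if a ∈ t then c a else 0 := by
  induction t with
  | nil => simp
  | cons v t ih =>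
    obtain ⟨hv, hnd'⟩ := List.nodup_cons.mp hnd
    rw [List.flatMap_cons, List.count_append, ih hnd']
    by_cases hav : a = v
    · subst hav
      simp [List.count_replicate, hv]
    · simp [List.count_replicate, hav, Ne.symm hav]

-- flattening ≤-sorted groups stays ≤-sorted
theorem pv_pairwise_flatMap (c : Int → Nat) (t : List Int)
    (hp : t.Pairwise (fun a b : Int => a ≤ b)) :
    (t.flatMap fun v => List.replicate (c v) v).Pairwise (fun a b : Int => a ≤ b) := by
  induction t with
  | nil => simp
  | cons v t ih =>
    obtain ⟨hv, hp'⟩ := List.pairwise_cons.mp hp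
    rw [List.flatMap_cons, List.pairwise_append]
    refine ⟨?_, ih hp', ?_⟩
    · exact List.pairwise_replicate.mpr (Or.inr le_rfl)
    · intro a ha b hb
      rw [List.mem_replicate] at ha
      obtain ⟨-, rfl⟩ := ha
      rw [List.mem_flatMap] at hb
      obtain ⟨u, hu, hb2⟩ := hb
      rw [List.mem_replicate] at hb2
      exact hb2.2 ▸ hv u hu

-- sorted(nums) is the sorted distinct values, each repeated its multiplicity
theorem pv_sorted_flatMap (nums : List Int) :
    PySem.List.sorted nums (fun x => x)
      = (PySem.List.sorted (PySem.Set.ofList nums) (fun x => x)).flatMap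
          (fun v => List.replicate (nums.count v) v) := by
  have hknd : (PySem.List.sorted (PySem.Set.ofList nums) (fun x => x)).Nodup :=
    (PySem.List.sorted_perm (PySem.Set.ofList nums) (fun x => x) false).nodup_iff.mpr
      (PySem.Set.nodup_ofList nums)
  have hmemks : ∀ a : Int,
      a ∈ PySem.List.sorted (PySem.Set.ofList nums) (fun x => x) ↔ a ∈ nums := by
    intro a
    rw [(PySem.List.sorted_perm (PySem.Set.ofList nums) (fun x => x) false).mem_iff,
      PySem.Set.mem_ofList]
  apply PySem.List.eq_of_perm_of_pairwise_le_of_injective (fun x : Int => x)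
    (fun a b h => h)
  · refine (PySem.List.sorted_perm nums (fun x => x) false).trans ?_
    rw [List.perm_iff_count]
    intro a
    rw [pv_count_flatMap (fun v => nums.count v) _ hknd a]
    by_cases ha : a ∈ nums
    · rw [if_pos ((hmemks a).mpr ha)]
    · rw [if_neg (fun h => ha ((hmemks a).mp h)), List.count_eq_zero.mpr ha]
  · exact PySem.List.sorted_pairwise nums (fun x => x)
  · exact pv_pairwise_flatMap (fun v => nums.count v) _
      (PySem.List.sorted_pairwise (PySem.Set.ofList nums) (fun x => x))

-- ===== VERDICT (by name: the statement is the Claim_ definition above) =====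
theorem can_partition_consecutive_subsets_spec : Claim_equal_can_partition_consecutive_subsets := by
  unfold Claim_equal_can_partition_consecutive_subsets
  intro nums _
  unfold Spec_can_partition_consecutive_subsets
  by_cases hnil : nums = []
  · subst hnil; decide
  · simp only [can_partition_consecutive_subsets, can_partition_consecutive_subsets_alt,
      if_neg hnil]
    rw [← PySem.Dict.counter_eq_foldl, PySem.Dict.keys_counter, pv_sorted_flatMap]
    have hknd : (PySem.List.sorted (PySem.Set.ofList nums) (fun x => x)).Nodup :=
      (PySem.List.sorted_perm (PySem.Set.ofList nums) (fun x => x) false).nodup_iff.mpr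
        (PySem.Set.nodup_ofList nums)
    have hXY := pvRun_flatMap nums (PySem.List.sorted (PySem.Set.ofList nums) (fun x => x))
      (PySem.Dict.counter nums) PySem.Dict.empty hknd
      (by
        intro v hv
        have hvnums : v ∈ nums := by
          have := (PySem.List.sorted_perm (PySem.Set.ofList nums) (fun x => x) false).mem_iff.mp hv
          exact (PySem.Set.mem_ofList nums v).mp this
        constructor
        · rw [PySem.Dict.contains_counter]
          exact List.elem_eq_true_of_mem hvnums
        · rw [PySem.Dict.getD_counter])
      (PySem.Dict.nodup_keys_counter nums)
      (by intro k; rw [PySem.Dict.getD_counter]; exact Int.natCast_nonneg _)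
      (by intro k; rw [PySem.Dict.getD_empty])
    rw [hXY]
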